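-- pv_equiv track=rewrite | github.com/krishancodes/ai-expense-tracker | backend/app/services/dashboard_service.py | _prev_months
-- ===== SOURCE A (Python) =====
-- def _prev_months(month: int, year: int, n: int) -> list[tuple[int, int]]:
--     """Return the last n calendar months as (month, year) tuples,
--     oldest first, ending at (month, year) inclusive."""
--     months = []
--     m, y = month, year
--     for _ in range(n):
--         months.append((m, y))
--         m -= 1
--         if m == 0:
--             m = 12
--             y -= 1
--     return list(reversed(months))
-- ===== SOURCE B (Python) =====
-- def _prev_months(month: int, year: int, n: int) -> list[tuple[int, int]]:
--     """Return the last n calendar months as (month, year) tuples,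
--     oldest first, ending at (month, year) inclusive."""
--     total = year * 12 + (month - 1)
--     out = []
--     for i in range(n):
--         idx = total - (n - 1) + i
--         yy, mm = divmod(idx, 12)
--         out.append((mm + 1, yy))
--     return out
-- ===== Notes on version B (the rewrite author's own statement) =====
-- stated objective: simpler
-- what changed: Replaces the decrement-with-wrap loop plus final reversal by a single forward loop over an absolute month index (year*12+month-1) decoded with divmod, building the list oldest-first directly.
-- outside the precondition, e.g. on _prev_months(13, 2024, 2): A returns [(12, 2024), (13, 2024)], B returns [(12, 2024), (1, 2025)]; on _prev_months(0, 2024, 2): A returns [(-1, 2024), (0, 2024)], B returns [(11, 2023), (12, 2023)]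
import Mathlib
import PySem

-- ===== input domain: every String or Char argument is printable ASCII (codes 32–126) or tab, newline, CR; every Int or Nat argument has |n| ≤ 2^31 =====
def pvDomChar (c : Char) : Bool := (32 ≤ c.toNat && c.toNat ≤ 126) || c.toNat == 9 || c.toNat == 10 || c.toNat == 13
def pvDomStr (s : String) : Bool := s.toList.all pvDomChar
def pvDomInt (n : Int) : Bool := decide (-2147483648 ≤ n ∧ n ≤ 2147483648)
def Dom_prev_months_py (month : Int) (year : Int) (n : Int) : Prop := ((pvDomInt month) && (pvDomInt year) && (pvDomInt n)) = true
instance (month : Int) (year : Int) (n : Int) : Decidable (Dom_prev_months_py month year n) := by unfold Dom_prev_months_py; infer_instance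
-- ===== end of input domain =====

-- B replaces A's decrement-with-wrap loop and final reversal by one forward loop over an
-- absolute month index decoded with divmod (objective: simpler; equal on months 1..12).


-- ===== PORT A =====
-- A-side helper: the body of A's for-loop
def aStep (st : List (Int × Int) × Int × Int) (_ : Int) : List (Int × Int) × Int × Int :=
  let months := st.1 ++ [(st.2.1, st.2.2)]
  let m := st.2.1 - 1
  if m = 0 then (months, 12, st.2.2 - 1) else (months, m, st.2.2)

def prev_months_py (month : Int) (year : Int) (n : Int) : List (Int × Int) :=
  ((PySem.List.pyRange 0 n 1).foldl aStep ([], month, year)).1.reverse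

-- ===== PORT B =====
def prev_months_py_alt (month : Int) (year : Int) (n : Int) : List (Int × Int) :=
  let total := year * 12 + (month - 1)
  (PySem.List.pyRange 0 n 1).foldl
    (fun out i =>
      let idx := total - (n - 1) + i
      out ++ [(PySem.Int.mod idx 12 + 1, PySem.Int.floordiv idx 12)]) []

-- ===== PRECONDITION & SPEC =====
-- Pre_ requires month to lie in the valid calendar range 1..12 whenever any month is actually
-- produced (n ≥ 1): outside that natural domain A's raw decrement-and-check returns
-- non-calendar tuples such as (13, y).
def Pre_prev_months_py (month : Int) (year : Int) (n : Int) : Prop := n ≤ 0 ∨ (1 ≤ month ∧ month ≤ 12)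
instance (month : Int) (year : Int) (n : Int) : Decidable (Pre_prev_months_py month year n) := by unfold Pre_prev_months_py; infer_instance
def pvWitness_prev_months_py : Int × Int × Int := (5, 2024, 3)

def Spec_prev_months_py (month : Int) (year : Int) (n : Int) (out : List (Int × Int)) : Prop := out = prev_months_py_alt month year n
instance (month : Int) (year : Int) (n : Int) (out : List (Int × Int)) : Decidable (Spec_prev_months_py month year n out) := by unfold Spec_prev_months_py; infer_instance

-- ===== CLAIM (what is proved, stated in full; the proofs are below) =====
def Claim_equal_prev_months_py : Prop := ∀ (month : Int) (year : Int) (n : Int), Dom_prev_months_py month year n → Pre_prev_months_py month year n → Spec_prev_months_py month year n (prev_months_py month year n)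

-- ===== LEMMAS AND PROOFS =====

-- newest-first trace of A's loop: the months list it accumulates
def aCore : Int → Int → Nat → List (Int × Int)
  | _, _, 0 => []
  | m, y, k+1 => (m, y) :: (if m - 1 = 0 then aCore 12 (y - 1) k else aCore (m - 1) y k)

-- decode an absolute month index, as B does
def monthOf (idx : Int) : Int × Int := (PySem.Int.mod idx 12 + 1, PySem.Int.floordiv idx 12)

theorem monthOf_eq (m y : Int) (h1 : 1 ≤ m) (h2 : m ≤ 12) :
    monthOf (y * 12 + (m - 1)) = (m, y) := by
  unfold monthOf
  rw [PySem.Int.mod_eq_emod_of_pos (by norm_num), PySem.Int.floordiv_eq_ediv_of_pos (by norm_num)]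
  simp only [Prod.mk.injEq]
  constructor <;> omega

theorem foldlA : ∀ (l : List Int) (m y : Int) (acc : List (Int × Int)),
    (l.foldl aStep (acc, m, y)).1 = acc ++ aCore m y l.length
  | [], m, y, acc => by simp [aCore]
  | x :: t, m, y, acc => by
    rw [List.foldl_cons, List.length_cons]
    by_cases h : m - 1 = 0
    · rw [show aStep (acc, m, y) x = (acc ++ [(m, y)], 12, y - 1) from by simp [aStep, h]]
      rw [foldlA t 12 (y - 1) (acc ++ [(m, y)])]
      simp [aCore, h]
    · rw [show aStep (acc, m, y) x = (acc ++ [(m, y)], m - 1, y) from by simp [aStep, h]]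
      rw [foldlA t (m - 1) y (acc ++ [(m, y)])]
      simp [aCore, h]

theorem aCore_reverse : ∀ (k : Nat) (m y : Int), 1 ≤ m → m ≤ 12 →
    (aCore m y k).reverse =
      (List.range k).map (fun (j : Nat) => monthOf (y * 12 + (m - 1) - ((k : Int) - 1) + (j : Int)))
  | 0, m, y, _, _ => by simp [aCore]
  | k + 1, m, y, h1, h2 => by
    rw [List.range_succ, List.map_append, List.map_cons, List.map_nil]
    by_cases h : m - 1 = 0
    · rw [show aCore m y (k + 1) = (m, y) :: aCore 12 (y - 1) k from by simp [aCore, h],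
        List.reverse_cons, aCore_reverse k 12 (y - 1) (by norm_num) (by norm_num)]
      congr 1
      · apply List.map_congr_left
        intro j _
        congr 1
        push_cast
        omega
      · congr 1
        rw [← monthOf_eq m y h1 h2]
        congr 1
        push_cast
        ring
    · rw [show aCore m y (k + 1) = (m, y) :: aCore (m - 1) y k from by simp [aCore, h],
        List.reverse_cons, aCore_reverse k (m - 1) y (by omega) (by omega)]
      congr 1
      · apply List.map_congr_left
        intro j _
        congr 1
        push_cast
        ring
      · congr 1
        rw [← monthOf_eq m y h1 h2]
        congr 1
        push_cast
        ring

-- ===== VERDICT (by name: the statement is the Claim_ definition above) =====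
theorem prev_months_py_spec : Claim_equal_prev_months_py := by
  intro month year n _ hpre
  unfold Spec_prev_months_py prev_months_py prev_months_py_alt
  rcases hpre with hn0 | ⟨h1, h2⟩
  · rw [PySem.List.pyRange_one_eq_nil (by omega : n ≤ 0)]
    rfl
  rw [foldlA, List.nil_append, PySem.List.foldl_append_singleton_eq_map, List.nil_append,
    PySem.List.length_pyRange_one, PySem.List.pyRange_one, List.map_map]
  rw [aCore_reverse _ month year h1 h2]
  by_cases hn : n ≤ 0
  · have h0 : (n - 0).toNat = 0 := by omega
    simp only [h0, List.range_zero, List.map_nil]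
  · apply List.map_congr_left
    intro j _
    congr 1
    have : ((n - 0).toNat : Int) = n := by omega
    rw [this]
    push_cast
    ring
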